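-- pv_equiv track=rewrite | github.com/OmarAl-Saleh/CS846-week11-presentation | Problem_A/A2/grid_matrix_graph_search.py | count_target_submatrices
-- ===== SOURCE A (Python) =====
-- from typing import List, Tuple
--
-- def count_target_submatrices(matrix: List[List[int]], target: int) -> int:
--     """
--     Problem 3:
--     Count the number of submatrices whose sum equals target.
--
--     """
--     rows = len(matrix)
--     cols = len(matrix[0])
--     count = 0
--
--     for r1 in range(rows):
--         for c1 in range(cols):
--             for r2 in range(r1, rows):
--                 for c2 in range(c1, cols):
--                     total = 0
--                     for r in range(r1, r2 + 1):
--                         for c in range(c1, c2 + 1):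
--                             total += matrix[r][c]
--                     if total == target:
--                         count += 1
--
--     return count
-- ===== SOURCE B (Python) =====
-- def count_target_submatrices(matrix, target):
--     """Row-pair compression + prefix-sum hashmap: O(R^2 C) instead of A's O(R^3 C^3)."""
--     cols = len(matrix[0])
--     count = 0
--     for r1 in range(len(matrix)):
--         colsum = [0] * cols
--         for row in matrix[r1:]:
--             colsum = [s + x for s, x in zip(colsum, row)]
--             prefix = {0: 1}
--             acc = 0
--             for x in colsum:
--                 acc += x
--                 count += prefix.get(acc - target, 0)
--                 prefix[acc] = prefix.get(acc, 0) + 1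
--     return count
-- ===== Notes on version B (the rewrite author's own statement) =====
-- stated objective: faster
-- what changed: Replaces A's six nested loops (recomputing every rectangle sum from scratch) by row-pair column-sum compression plus the prefix-sum hashmap count of subarrays summing to target.
import Mathlib
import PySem

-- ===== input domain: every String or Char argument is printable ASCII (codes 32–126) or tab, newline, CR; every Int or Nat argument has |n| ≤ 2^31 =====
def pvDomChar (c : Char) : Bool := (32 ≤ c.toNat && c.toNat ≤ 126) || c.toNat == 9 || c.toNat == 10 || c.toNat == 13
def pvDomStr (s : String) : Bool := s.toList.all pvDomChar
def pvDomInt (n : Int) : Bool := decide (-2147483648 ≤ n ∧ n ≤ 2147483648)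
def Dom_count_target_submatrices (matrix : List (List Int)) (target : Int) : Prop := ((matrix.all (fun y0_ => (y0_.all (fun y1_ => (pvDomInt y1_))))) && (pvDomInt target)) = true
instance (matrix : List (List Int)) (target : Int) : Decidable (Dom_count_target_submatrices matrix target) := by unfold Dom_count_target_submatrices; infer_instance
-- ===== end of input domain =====

-- B replaces A's six nested loops by row-pair column-sum compression plus the
-- prefix-sum hashmap subarray count: O(R^2 C) instead of O(R^3 C^3).

-- ===== PORT A =====
def count_target_submatrices (matrix : List (List Int)) (target : Int) : Int :=
  let rows : Int := PySem.List.len matrix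
  let cols : Int := PySem.List.len (PySem.List.pyGetD matrix 0 [])
  (PySem.List.pyRange 0 rows 1).foldl (fun count r1 =>
    (PySem.List.pyRange 0 cols 1).foldl (fun count c1 =>
      (PySem.List.pyRange r1 rows 1).foldl (fun count r2 =>
        (PySem.List.pyRange c1 cols 1).foldl (fun count c2 =>
          let total := (PySem.List.pyRange r1 (r2 + 1) 1).foldl (fun total r =>
            (PySem.List.pyRange c1 (c2 + 1) 1).foldl (fun total c =>
              total + PySem.List.pyGetD (PySem.List.pyGetD matrix r []) c 0) total) 0
          if total = target then count + 1 else count) count) count) count) 0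

-- ===== PORT B =====
-- inner loop of Source B: acc += x; count += prefix.get(acc - target, 0); prefix[acc] = prefix.get(acc, 0) + 1
def altInner (target : Int) (st : Int × PySem.Dict Int Int × Int) (x : Int) :
    Int × PySem.Dict Int Int × Int :=
  let acc := st.1 + x
  (acc, st.2.1.insert acc (st.2.1.getD acc 0 + 1), st.2.2 + st.2.1.getD (acc - target) 0)

-- body of 'for row in matrix[r1:]': colsum = [s + x for s, x in zip(colsum, row)], then the prefix-dict pass
def altRow (target : Int) (st : List Int × Int) (row : List Int) : List Int × Int :=
  let colsum := (st.1.zip row).map (fun p => p.1 + p.2)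
  (colsum,
    (colsum.foldl (altInner target) (0, PySem.Dict.empty.insert 0 1, st.2)).2.2)

def count_target_submatrices_alt (matrix : List (List Int)) (target : Int) : Int :=
  let cols : Int := PySem.List.len (PySem.List.pyGetD matrix 0 [])
  (PySem.List.pyRange 0 (PySem.List.len matrix) 1).foldl (fun count r1 =>
    ((PySem.List.slice matrix (some r1) none).foldl (altRow target)
      (PySem.List.pyRepeat [0] cols, count)).2) 0

-- ===== PRECONDITION & SPEC =====
-- Pre_ excludes exactly the inputs on which A raises IndexError: the empty matrix
-- (matrix[0]) and non-empty matrices with some row shorter than len(matrix[0])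
-- (A indexes every row up to that width; B's zip truncates there instead).
def Pre_count_target_submatrices (matrix : List (List Int)) (target : Int) : Prop :=
  matrix ≠ [] ∧ ∀ row ∈ matrix, (matrix.getD 0 []).length ≤ row.length
instance (matrix : List (List Int)) (target : Int) : Decidable (Pre_count_target_submatrices matrix target) := by unfold Pre_count_target_submatrices; infer_instance

def pvWitness_count_target_submatrices : List (List Int) × Int := ([[1, 2], [3, 4]], 3)

def Spec_count_target_submatrices (matrix : List (List Int)) (target : Int) (out : Int) : Prop := out = count_target_submatrices_alt matrix target
instance (matrix : List (List Int)) (target : Int) (out : Int) : Decidable (Spec_count_target_submatrices matrix target out) := by unfold Spec_count_target_submatrices; infer_instance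

-- ===== CLAIM (what is proved, stated in full; the proofs are below) =====
def Claim_equal_count_target_submatrices : Prop := ∀ (matrix : List (List Int)) (target : Int), Dom_count_target_submatrices matrix target → Pre_count_target_submatrices matrix target → Spec_count_target_submatrices matrix target (count_target_submatrices matrix target)

-- ===== LEMMAS AND PROOFS =====

-- entry m[r][c] (0 where out of range), column sums over rows [r1, r2), 0/1 indicator
def pvCell (m : List (List Int)) (r c : Nat) : Int := (m.getD r []).getD c 0
def pvColS (m : List (List Int)) (r1 r2 c : Nat) : Int := ∑ r ∈ Finset.Ico r1 r2, pvCell m r c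
def pvInd (t x : Int) : Int := if x = t then 1 else 0

-- abstract form of B's prefix-dict loop: s = running sum, P = multiset of prefix values seen so far
def pvCnt (t : Int) : List Int → Int → List Int → Int
  | [], _, _ => 0
  | x :: xs, s, P => (P.count (s + x - t) : Int) + pvCnt t xs (s + x) (P ++ [s + x])

def pvPre (a : List Int) (i : Nat) : Int := (a.take i).sum
def pvQL (a : List Int) (s : Int) (j : Nat) : List Int := (List.range j).map (fun i => s + pvPre a (i + 1))
def pvColsums (m : List (List Int)) (C r1 k : Nat) : List Int := (List.range C).map (fun c => pvColS m r1 k c)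
def pvOne (t : Int) (a : List Int) : Int := (a.foldl (altInner t) (0, PySem.Dict.empty.insert 0 1, 0)).2.2

theorem pv_foldl_add_of {α : Type} (l : List α) (f : Int → α → Int) (g : α → Int)
    (h : ∀ acc x, ∀ _ : x ∈ l, f acc x = acc + g x) (a : Int) :
    l.foldl f a = a + (l.map g).sum := by
  rw [PySem.List.foldl_congr_mem l f (fun acc x => acc + g x) a h]
  exact PySem.List.foldl_add l g a

theorem pv_sum_map_range (f : Nat → Int) (n : Nat) :
    ((List.range n).map f).sum = ∑ i ∈ Finset.range n, f i := by
  induction n with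
  | zero => simp
  | succ n ih => rw [List.range_succ, Finset.sum_range_succ]; simp [ih]

theorem pv_sum_pyRange (a b : Nat) (g : Int → Int) :
    ((PySem.List.pyRange (a : Int) (b : Int) 1).map g).sum = ∑ k ∈ Finset.Ico a b, g (k : Int) := by
  rw [PySem.List.pyRange_one, List.map_map, pv_sum_map_range]
  rw [Finset.sum_Ico_eq_sum_range]
  have : ((b : Int) - (a : Int)).toNat = b - a := by omega
  rw [this]
  apply Finset.sum_congr rfl
  intro i hi
  simp only [Function.comp_apply]
  push_cast
  ring_nf

theorem pv_A_total (m : List (List Int)) (r1 c1 r2 c2 : Nat) :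
    ((PySem.List.pyRange (r1 : Int) ((r2 : Int) + 1) 1).foldl (fun total r =>
      (PySem.List.pyRange (c1 : Int) ((c2 : Int) + 1) 1).foldl (fun total c =>
        total + PySem.List.pyGetD (PySem.List.pyGetD m r []) c 0) total) 0)
    = ∑ r ∈ Finset.Ico r1 (r2 + 1), ∑ c ∈ Finset.Ico c1 (c2 + 1), pvCell m r c := by
  have h2 : ((r2 : Int) + 1) = ((r2 + 1 : Nat) : Int) := by push_cast; ring
  have h3 : ((c2 : Int) + 1) = ((c2 + 1 : Nat) : Int) := by push_cast; ring
  rw [h2, h3]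
  have hin : ∀ (r tot : Int),
      (PySem.List.pyRange (c1 : Int) ((c2 + 1 : Nat) : Int) 1).foldl (fun total c =>
        total + PySem.List.pyGetD (PySem.List.pyGetD m r []) c 0) tot
      = tot + ((PySem.List.pyRange (c1 : Int) ((c2 + 1 : Nat) : Int) 1).map
          (fun c => PySem.List.pyGetD (PySem.List.pyGetD m r []) c 0)).sum := by
    intro r tot
    exact pv_foldl_add_of _ _ _ (fun acc x _ => rfl) tot
  rw [pv_foldl_add_of _ _
      (fun r => ((PySem.List.pyRange (c1 : Int) ((c2 + 1 : Nat) : Int) 1).map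
          (fun c => PySem.List.pyGetD (PySem.List.pyGetD m r []) c 0)).sum)
      (fun acc x _ => hin x acc) 0]
  rw [zero_add, pv_sum_pyRange]
  apply Finset.sum_congr rfl
  intro r _
  rw [pv_sum_pyRange]
  apply Finset.sum_congr rfl
  intro c _
  simp [pvCell]

theorem pv_A_eq (m : List (List Int)) (t : Int) :
    count_target_submatrices m t
    = ∑ r1 ∈ Finset.range m.length, ∑ c1 ∈ Finset.range (m.getD 0 []).length,
      ∑ r2 ∈ Finset.Ico r1 m.length, ∑ c2 ∈ Finset.Ico c1 (m.getD 0 []).length,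
        pvInd t (∑ r ∈ Finset.Ico r1 (r2 + 1), ∑ c ∈ Finset.Ico c1 (c2 + 1), pvCell m r c) := by
  set R := m.length with hR
  set C := (m.getD 0 []).length with hCd
  show (PySem.List.pyRange 0 (PySem.List.len m) 1).foldl _ 0 = _
  have hlen : PySem.List.len m = ((R : Nat) : Int) := by simp [PySem.List.len_eq, hR]
  have hcols : PySem.List.len (PySem.List.pyGetD m 0 []) = ((C : Nat) : Int) := by
    simp [PySem.List.len_eq, hCd, PySem.List.pyGetD_zero]
  rw [hlen, hcols]
  have h4 : ∀ (r1 c1 r2 count : Int),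
      (PySem.List.pyRange c1 ((C : Nat) : Int) 1).foldl (fun count c2 =>
        let total := (PySem.List.pyRange r1 (r2 + 1) 1).foldl (fun total r =>
          (PySem.List.pyRange c1 (c2 + 1) 1).foldl (fun total c =>
            total + PySem.List.pyGetD (PySem.List.pyGetD m r []) c 0) total) 0
        if total = t then count + 1 else count) count
      = count + ((PySem.List.pyRange c1 ((C : Nat) : Int) 1).map (fun c2 =>
          pvInd t ((PySem.List.pyRange r1 (r2 + 1) 1).foldl (fun total r =>
            (PySem.List.pyRange c1 (c2 + 1) 1).foldl (fun total c =>
              total + PySem.List.pyGetD (PySem.List.pyGetD m r []) c 0) total) 0))).sum := by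
    intro r1 c1 r2 count
    apply pv_foldl_add_of
    intro acc x _
    dsimp only
    unfold pvInd
    split_ifs with h <;> ring
  have h3 : ∀ (r1 c1 count : Int),
      (PySem.List.pyRange r1 ((R : Nat) : Int) 1).foldl (fun count r2 =>
        (PySem.List.pyRange c1 ((C : Nat) : Int) 1).foldl (fun count c2 =>
          let total := (PySem.List.pyRange r1 (r2 + 1) 1).foldl (fun total r =>
            (PySem.List.pyRange c1 (c2 + 1) 1).foldl (fun total c =>
              total + PySem.List.pyGetD (PySem.List.pyGetD m r []) c 0) total) 0
          if total = t then count + 1 else count) count) count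
      = count + ((PySem.List.pyRange r1 ((R : Nat) : Int) 1).map (fun r2 =>
          ((PySem.List.pyRange c1 ((C : Nat) : Int) 1).map (fun c2 =>
            pvInd t ((PySem.List.pyRange r1 (r2 + 1) 1).foldl (fun total r =>
              (PySem.List.pyRange c1 (c2 + 1) 1).foldl (fun total c =>
                total + PySem.List.pyGetD (PySem.List.pyGetD m r []) c 0) total) 0))).sum)).sum := by
    intro r1 c1 count
    apply pv_foldl_add_of
    intro acc x _
    exact h4 r1 c1 x acc
  have h2 : ∀ (r1 count : Int),
      (PySem.List.pyRange 0 ((C : Nat) : Int) 1).foldl (fun count c1 =>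
        (PySem.List.pyRange r1 ((R : Nat) : Int) 1).foldl (fun count r2 =>
          (PySem.List.pyRange c1 ((C : Nat) : Int) 1).foldl (fun count c2 =>
            let total := (PySem.List.pyRange r1 (r2 + 1) 1).foldl (fun total r =>
              (PySem.List.pyRange c1 (c2 + 1) 1).foldl (fun total c =>
                total + PySem.List.pyGetD (PySem.List.pyGetD m r []) c 0) total) 0
            if total = t then count + 1 else count) count) count) count
      = count + ((PySem.List.pyRange 0 ((C : Nat) : Int) 1).map (fun c1 =>
          ((PySem.List.pyRange r1 ((R : Nat) : Int) 1).map (fun r2 =>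
            ((PySem.List.pyRange c1 ((C : Nat) : Int) 1).map (fun c2 =>
              pvInd t ((PySem.List.pyRange r1 (r2 + 1) 1).foldl (fun total r =>
                (PySem.List.pyRange c1 (c2 + 1) 1).foldl (fun total c =>
                  total + PySem.List.pyGetD (PySem.List.pyGetD m r []) c 0) total) 0))).sum)).sum)).sum := by
    intro r1 count
    apply pv_foldl_add_of
    intro acc x _
    exact h3 r1 x acc
  rw [pv_foldl_add_of _ _ _ (fun acc x _ => h2 x acc) 0, zero_add]
  have h0C : ((PySem.List.pyRange 0 ((C : Nat) : Int) 1)) = (PySem.List.pyRange ((0 : Nat) : Int) ((C : Nat) : Int) 1) := by norm_num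
  have h0R : ((PySem.List.pyRange 0 ((R : Nat) : Int) 1)) = (PySem.List.pyRange ((0 : Nat) : Int) ((R : Nat) : Int) 1) := by norm_num
  rw [h0R, pv_sum_pyRange]
  rw [Finset.range_eq_Ico]
  apply Finset.sum_congr rfl
  intro r1 _
  rw [h0C, pv_sum_pyRange]
  apply Finset.sum_congr rfl
  intro c1 _
  rw [pv_sum_pyRange]
  apply Finset.sum_congr rfl
  intro r2 _
  rw [pv_sum_pyRange]
  apply Finset.sum_congr rfl
  intro c2 _
  rw [pv_A_total]

theorem pv_B_dict (t : Int) (a : List Int) : ∀ (s : Int) (d : PySem.Dict Int Int) (acc : Int) (P : List Int),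
    (∀ v, d.getD v 0 = (P.count v : Int)) →
    (a.foldl (altInner t) (s, d, acc)).2.2 = acc + pvCnt t a s P := by
  induction a with
  | nil => intro s d acc P h; simp [pvCnt]
  | cons x xs ih =>
    intro s d acc P h
    show ((xs.foldl (altInner t) (altInner t (s, d, acc) x))).2.2 = _
    rw [show altInner t (s, d, acc) x
        = (s + x, d.insert (s + x) (d.getD (s + x) 0 + 1), acc + d.getD (s + x - t) 0) from rfl]
    rw [ih (s + x) _ _ (P ++ [s + x]) ?_]
    · rw [pvCnt, h (s + x - t)]
      ring
    · intro v
      rw [PySem.Dict.getD_insert]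
      by_cases hv : v = s + x
      · subst hv
        rw [if_pos rfl, h, List.count_append]
        simp
      · rw [if_neg hv, h, List.count_append]
        simp [List.count_singleton]
        omega

theorem pv_pre_cons (x : Int) (xs : List Int) (i : Nat) :
    pvPre (x :: xs) (i + 1) = x + pvPre xs i := by
  simp [pvPre]

theorem pv_QL_cons (x : Int) (xs : List Int) (s : Int) (j : Nat) :
    pvQL (x :: xs) s (j + 1) = (s + x) :: pvQL xs (s + x) j := by
  unfold pvQL
  rw [List.range_succ_eq_map]
  simp [pv_pre_cons, Function.comp_def]
  constructor
  · simp [pvPre]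
  · intro a _; ring

theorem pv_pvCnt_eq (t : Int) (a : List Int) : ∀ (s : Int) (P : List Int),
    pvCnt t a s P = ∑ j ∈ Finset.range a.length, ((P ++ pvQL a s j).count (s + pvPre a (j + 1) - t) : Int) := by
  induction a with
  | nil => intro s P; simp [pvCnt]
  | cons x xs ih =>
    intro s P
    rw [pvCnt, ih]
    rw [List.length_cons, Finset.sum_range_succ', add_comm]
    congr 1
    · apply Finset.sum_congr rfl
      intro j _
      rw [pv_QL_cons, pv_pre_cons]
      rw [show P ++ ((s + x) :: pvQL xs (s + x) j) = (P ++ [s + x]) ++ pvQL xs (s + x) j by simp]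
      congr 2
      ring
    · simp [pvQL, pvPre]

theorem pv_count_map_range (f : Nat → Int) (k : Nat) (v : Int) :
    ((((List.range k).map f).count v : Nat) : Int) = ∑ i ∈ Finset.range k, pvInd v (f i) := by
  induction k with
  | zero => simp
  | succ k ih =>
    rw [List.range_succ, Finset.sum_range_succ, List.map_append, List.count_append]
    push_cast
    rw [ih]
    simp [pvInd, List.count_singleton]

theorem pv_pvOne_eq (t : Int) (a : List Int) :
    pvOne t a = ∑ j ∈ Finset.range a.length, ∑ i ∈ Finset.range (j + 1), pvInd t (pvPre a (j + 1) - pvPre a i) := by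
  unfold pvOne
  rw [pv_B_dict t a 0 _ 0 [0] ?_]
  · rw [zero_add, pv_pvCnt_eq]
    apply Finset.sum_congr rfl
    intro j _
    have hQ : ([(0 : Int)] ++ pvQL a 0 j) = (List.range (j + 1)).map (pvPre a) := by
      rw [List.range_succ_eq_map]
      simp [pvQL, pvPre, Function.comp_def]
    rw [hQ, pv_count_map_range]
    apply Finset.sum_congr rfl
    intro i _
    unfold pvInd
    have : (pvPre a i = 0 + pvPre a (j + 1) - t) ↔ (pvPre a (j + 1) - pvPre a i = t) := by omega
    simp only [this]
  · intro v
    rw [PySem.Dict.getD_insert]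
    by_cases h : v = 0
    · simp [h]
    · simp [h, PySem.Dict.getD_empty, Ne.symm h]

theorem pv_pre_colsums (m : List (List Int)) (C r1 k i : Nat) (hi : i ≤ C) :
    pvPre (pvColsums m C r1 k) i = ∑ c ∈ Finset.range i, pvColS m r1 k c := by
  unfold pvPre pvColsums
  rw [← List.map_take, List.take_range, Nat.min_eq_left hi, pv_sum_map_range]

theorem pv_colsums_self (m : List (List Int)) (C k : Nat) :
    pvColsums m C k k = List.replicate C (0 : Int) := by
  unfold pvColsums pvColS
  rw [List.eq_replicate_iff]
  simp

theorem pv_colsums_len (m : List (List Int)) (C r1 k : Nat) : (pvColsums m C r1 k).length = C := by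
  simp [pvColsums]

theorem pv_colsums_step (m : List (List Int)) (C r1 k : Nat) (hk : r1 ≤ k) (hkR : k < m.length)
    (hrow : C ≤ m[k].length) :
    (((pvColsums m C r1 k).zip m[k]).map (fun p => p.1 + p.2)) = pvColsums m C r1 (k + 1) := by
  apply List.ext_getElem
  · simp [pvColsums]; omega
  · intro i h1 h2
    simp only [List.getElem_map, List.getElem_zip]
    have hiC : i < C := by simp [pvColsums] at h2; omega
    unfold pvColsums
    simp only [List.getElem_map, List.getElem_range]
    unfold pvColS
    rw [Finset.sum_Ico_succ_top hk]
    congr 1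
    unfold pvCell
    rw [List.getD_eq_getElem _ _ hkR, List.getD_eq_getElem _ _ (by omega)]

theorem pv_d0 : ∀ v : Int, (PySem.Dict.empty.insert (0 : Int) (1 : Int)).getD v 0 = (List.count v [(0 : Int)] : Int) := by
  intro v
  rw [PySem.Dict.getD_insert]
  by_cases h : v = 0
  · simp [h]
  · simp [h, PySem.Dict.getD_empty, Ne.symm h]

theorem pv_one_shift (t : Int) (a : List Int) (acc : Int) :
    (a.foldl (altInner t) (0, PySem.Dict.empty.insert 0 1, acc)).2.2 = acc + pvOne t a := by
  rw [pv_B_dict t a 0 _ acc [0] pv_d0]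
  unfold pvOne
  rw [pv_B_dict t a 0 _ 0 [0] pv_d0, zero_add]

theorem pv_B_rows (m : List (List Int)) (t : Int) (C r1 : Nat)
    (hC : ∀ row ∈ m, C ≤ row.length) :
    ∀ (n k : Nat) (acc : Int), r1 ≤ k → k + n = m.length →
    ((m.drop k).foldl (altRow t) (pvColsums m C r1 k, acc)).2
      = acc + ∑ j ∈ Finset.Ico k m.length, pvOne t (pvColsums m C r1 (j + 1)) := by
  intro n
  induction n with
  | zero =>
    intro k acc hk hlen
    rw [List.drop_of_length_le (by omega)]
    rw [show Finset.Ico k m.length = ∅ by rw [Finset.Ico_eq_empty_iff]; omega]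
    simp
  | succ n ih =>
    intro k acc hk hlen
    have hkR : k < m.length := by omega
    rw [List.drop_eq_getElem_cons hkR, List.foldl_cons]
    rw [show altRow t (pvColsums m C r1 k, acc) m[k]
        = (pvColsums m C r1 (k + 1), acc + pvOne t (pvColsums m C r1 (k + 1))) from ?_]
    · rw [ih (k + 1) _ (by omega) (by omega)]
      rw [Finset.sum_eq_sum_Ico_succ_bot hkR]
      ring
    · unfold altRow
      dsimp only
      rw [pv_colsums_step m C r1 k hk hkR (hC _ (List.getElem_mem hkR)), pv_one_shift]

theorem pv_B_eq (m : List (List Int)) (t : Int)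
    (hC : ∀ row ∈ m, (m.getD 0 []).length ≤ row.length) :
    count_target_submatrices_alt m t
    = ∑ r1 ∈ Finset.range m.length, ∑ r2 ∈ Finset.Ico r1 m.length,
      ∑ j ∈ Finset.range (m.getD 0 []).length, ∑ i ∈ Finset.range (j + 1),
        pvInd t (∑ c ∈ Finset.Ico i (j + 1), pvColS m r1 (r2 + 1) c) := by
  set R := m.length with hR
  set C := (m.getD 0 []).length with hCd
  show (PySem.List.pyRange 0 (PySem.List.len m) 1).foldl _ 0 = _
  have hlen : PySem.List.len m = ((R : Nat) : Int) := by simp [PySem.List.len_eq, hR]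
  have hcols : PySem.List.len (PySem.List.pyGetD m 0 []) = ((C : Nat) : Int) := by
    simp [PySem.List.len_eq, hCd, PySem.List.pyGetD_zero]
  rw [hlen, hcols]
  rw [pv_foldl_add_of _ _
      (fun r1 => ∑ j ∈ Finset.Ico r1.toNat R, pvOne t (pvColsums m C r1.toNat (j + 1))) ?_ 0]
  · rw [zero_add]
    rw [show (PySem.List.pyRange 0 ((R : Nat) : Int) 1) = (PySem.List.pyRange ((0 : Nat) : Int) ((R : Nat) : Int) 1) by norm_num]
    rw [pv_sum_pyRange, ← Finset.range_eq_Ico]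
    apply Finset.sum_congr rfl
    intro r1 _
    simp only [Int.toNat_natCast]
    apply Finset.sum_congr rfl
    intro r2 hr2
    rw [pv_pvOne_eq, pv_colsums_len]
    apply Finset.sum_congr rfl
    intro j hj
    apply Finset.sum_congr rfl
    intro i hi
    simp only [Finset.mem_range] at hj hi
    rw [pv_pre_colsums m C r1 (r2 + 1) (j + 1) (by omega),
        pv_pre_colsums m C r1 (r2 + 1) i (by omega),
        ← Finset.sum_Ico_eq_sub _ (by omega)]
  · intro acc x hx
    have hmem := (PySem.List.mem_pyRange_one).1 hx
    have hx0 : 0 ≤ x := hmem.1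
    have hxR : x.toNat < R := by omega
    rw [PySem.List.slice_from _ hx0, PySem.List.pyRepeat_singleton]
    rw [show (((C : Nat) : Int)).toNat = C by omega]
    rw [← pv_colsums_self m C x.toNat]
    rw [pv_B_rows m t C x.toNat hC (R - x.toNat) x.toNat acc (le_refl _) (by omega)]

theorem pv_triangle (C : Nat) (f : Nat → Nat → Int) :
    ∑ c1 ∈ Finset.range C, ∑ c2 ∈ Finset.Ico c1 C, f c1 c2
      = ∑ c2 ∈ Finset.range C, ∑ c1 ∈ Finset.range (c2 + 1), f c1 c2 := by
  apply Finset.sum_comm'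
  intro i j
  simp only [Finset.mem_range, Finset.mem_Ico]
  omega

-- ===== VERDICT (by name: the statement is the Claim_ definition above) =====
theorem count_target_submatrices_spec : Claim_equal_count_target_submatrices := by
  intro matrix target _ hpre
  unfold Spec_count_target_submatrices
  rw [pv_A_eq, pv_B_eq matrix target hpre.2]
  apply Finset.sum_congr rfl
  intro r1 _
  rw [Finset.sum_comm]
  apply Finset.sum_congr rfl
  intro r2 _
  rw [pv_triangle]
  apply Finset.sum_congr rfl
  intro j _
  apply Finset.sum_congr rfl
  intro i _
  unfold pvColS
  rw [Finset.sum_comm]
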